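-- pv_equiv track=rewrite | github.com/nyagami/Python-PTIT | PYKT12012 - VẪN LÀ XÁC SUẤT CHỌN BIT.py | count
-- ===== SOURCE A (Python) =====
-- def gcd(a, b):
--     if b == 0: return a
--     return gcd(b, a%b)
--
-- def C(n, k):
--     if k > n: return 0
--     if k > n-k: k = n-k
--     tu, mau = 1, 1
--     for i in range(1, k+1):
--         tu*=(n-k+i)
--         mau*=i
--         g = gcd(tu, mau)
--         tu//=g
--         mau//=g
--     return tu//mau
--
-- def count(i, j, x): #number of integer which hav i bit and j + 1 bit 1 and <= xs
--     s = bin(x)[2:]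
--     if i > len(s): return 0
--     if i < len(s): return(C(i-1, j))
--     ans = 0
--     rm = j
--     for k in range(1, i):
--         if rm < 0: break
--         if s[k] == '1':
--             ans += C(i-k-1, rm)
--             rm -= 1
--     if rm >= 0 and s.count('1') == j + 1: ans += 1
--     return ans
-- ===== SOURCE B (Python) =====
-- def binom(n, k):
--     # exact binomial coefficient, 0 outside 0 <= k <= n
--     if k < 0 or k > n:
--         return 0
--     k = min(k, n - k)
--     r = 1
--     for t in range(k):
--         r = r * (n - t) // (t + 1)
--     return r
--
-- def count(i, j, x):
--     # complement counting: C(i-1, j) minus the i-bit numbers with j+1 ones that exceed x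
--     s = bin(x)[2:]
--     L = len(s)
--     if i > L:
--         return 0
--     if i < L:
--         return binom(i - 1, j)
--     over = 0
--     ones = 0
--     for k, ch in enumerate(s):
--         if ch == '0':
--             over += binom(i - 1 - k, j - ones)
--         else:
--             ones += 1
--     return binom(i - 1, j) - over
-- ===== Notes on version B (the rewrite author's own statement) =====
-- stated objective: alternative
-- what changed: B counts by complement (C(i-1,j) minus the i-bit numbers with j+1 ones exceeding x, a single pass over the '0' digits) instead of A's forward scan over the '1' digits with a decreasing remaining-ones budget, early break and separate +1 for x itself, and computes binomials by the exact multiplicative formula instead of A's gcd-reduced fraction loop.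
-- intended difference: For j < 0 with j <= i-1 and i below x's bit length, A returns C(i-1,j) = 1 because its hand-rolled C treats a negative k as an empty product; B returns 0, the intended count of numbers with j+1 <= 0 one-bits. — e.g. on count(0, -1, 0): A returns 1, B returns 0
-- outside the precondition, e.g. on count(14, 1, -4096): A returns 12, B returns 13
import Mathlib
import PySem

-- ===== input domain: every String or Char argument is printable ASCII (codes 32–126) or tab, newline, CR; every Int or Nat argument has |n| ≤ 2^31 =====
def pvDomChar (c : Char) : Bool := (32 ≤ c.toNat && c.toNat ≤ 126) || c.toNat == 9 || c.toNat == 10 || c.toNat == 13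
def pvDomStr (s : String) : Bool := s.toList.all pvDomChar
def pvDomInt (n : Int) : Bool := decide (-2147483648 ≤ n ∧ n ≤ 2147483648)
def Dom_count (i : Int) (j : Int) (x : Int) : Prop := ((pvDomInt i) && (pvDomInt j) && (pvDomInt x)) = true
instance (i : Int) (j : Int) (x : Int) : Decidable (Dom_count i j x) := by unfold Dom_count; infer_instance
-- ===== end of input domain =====

-- B replaces A's forward digit scan (running remaining-ones budget with early break, plus a
-- separate +1 for x itself) by complement counting: C(i-1,j) minus the numbers that exceed x,
-- and replaces A's gcd-reducing fraction loop for C(n,k) by the exact multiplicative formula.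


-- ===== PORT A =====

-- Python's a % b (sign of the divisor) shrinks in absolute value: termination of gcdA
theorem pymod_natAbs_lt (a b : Int) (hb : b ≠ 0) : (PySem.Int.mod a b).natAbs < b.natAbs := by
  have h := Int.emod_nonneg a hb
  have h2 : a % b < b.natAbs := by
    rcases lt_or_gt_of_ne hb with hneg | hpos
    · have he : a % b = a % (-b) := by rw [Int.emod_neg]
      have := Int.emod_lt_of_pos a (b := -b) (by omega)
      omega
    · have := Int.emod_lt_of_pos a hpos
      omega
  simp only [PySem.Int.mod, Int.fmod_eq_emod]
  split_ifs with hd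
  · omega
  · have : ¬ (0 ≤ b) := by intro h0; exact hd (Or.inl h0)
    have hne : a % b ≠ 0 := by
      intro h0; exact hd (Or.inr (Int.dvd_of_emod_eq_zero h0))
    omega

def gcdA (a b : Int) : Int :=
  if hb : b = 0 then a else gcdA b (PySem.Int.mod a b)
termination_by b.natAbs
decreasing_by exact pymod_natAbs_lt a b hb

def stepC (n k : Int) (st : Int × Int) (i : Int) : Int × Int :=
  let tu := st.1 * (n - k + i)
  let mau := st.2 * i
  let g := gcdA tu mau
  (PySem.Int.floordiv tu g, PySem.Int.floordiv mau g)

-- port of A's helper C(n, k) (gcd-reduced fraction loop)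
def CA (n k0 : Int) : Int :=
  if k0 > n then 0
  else
    let k := if k0 > n - k0 then n - k0 else k0
    let p := (PySem.List.pyRange 1 (k + 1)).foldl (stepC n k) (1, 1)
    PySem.Int.floordiv p.1 p.2

-- A's "for k in range(1, i)" loop with its "if rm < 0: break"
def loopA (i : Int) (s : List Char) (ks : List Int) (ans rm : Int) : Int × Int :=
  match ks with
  | [] => (ans, rm)
  | k :: rest =>
    if rm < 0 then (ans, rm)
    else if PySem.List.pyGetD s k ' ' = '1' then
      loopA i s rest (ans + CA (i - k - 1) rm) (rm - 1)
    else loopA i s rest ans rm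

def count (i : Int) (j : Int) (x : Int) : Int :=
  let s := PySem.List.slice (PySem.Int.toBinChars0b x) (some 2) none  -- bin(x)[2:]
  if i > PySem.List.len s then 0
  else if i < PySem.List.len s then CA (i - 1) j
  else
    let p := loopA i s (PySem.List.pyRange 1 i) 0 j
    if 0 ≤ p.2 ∧ ((s.count '1' : Int) = j + 1) then p.1 + 1 else p.1

-- ===== PORT B =====

def stepB (n : Int) (r t : Int) : Int := PySem.Int.floordiv (r * (n - t)) (t + 1)

-- B's helper binom(n, k): exact multiplicative formula, 0 outside 0 ≤ k ≤ n
def binomB (n k0 : Int) : Int :=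
  if k0 < 0 ∨ k0 > n then 0
  else (PySem.List.pyRange 0 (min k0 (n - k0))).foldl (stepB n) 1

-- B's single pass over the digits: state (ovr, ones, k)
def stepO (i j : Int) (st : Int × Int × Int) (ch : Char) : Int × Int × Int :=
  if ch = '0' then (st.1 + binomB (i - 1 - st.2.2) (j - st.2.1), st.2.1, st.2.2 + 1)
  else (st.1, st.2.1 + 1, st.2.2 + 1)

def count_alt (i : Int) (j : Int) (x : Int) : Int :=
  let s := PySem.List.slice (PySem.Int.toBinChars0b x) (some 2) none  -- bin(x)[2:]
  if i > PySem.List.len s then 0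
  else if i < PySem.List.len s then binomB (i - 1) j
  else
    let p := s.foldl (stepO i j) (0, 0, 0)
    binomB (i - 1) j - p.1

-- ===== PRECONDITION & SPEC =====

-- Pre_ excludes negative x, outside the task's natural domain (counting positive i-bit
-- integers ≤ x): there bin(x)[2:] is the 'b'-prefixed string "b101...", and A's value is an
-- artefact of slicing "-0b..."; B does the natural thing and need not match it.
def Pre_count (i : Int) (j : Int) (x : Int) : Prop := 0 ≤ x
instance (i : Int) (j : Int) (x : Int) : Decidable (Pre_count i j x) := by unfold Pre_count; infer_instance

def pvWitness_count : Int × Int × Int := (3, 1, 6)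

-- For j < 0 with j ≤ i-1 and i smaller than x's bit length, A returns C(i-1,j) = 1 because its
-- hand-rolled C treats a negative k as an empty product, while B returns 0, the intended count
-- of numbers with j+1 ≤ 0 one-bits.
def D_count (i : Int) (j : Int) (x : Int) : Prop :=
  j < 0 ∧ j ≤ i - 1 ∧ (i ≤ 0 ∨ 2 ^ i.toNat ≤ x)
instance (i : Int) (j : Int) (x : Int) : Decidable (D_count i j x) := by unfold D_count; infer_instance

def Spec_count (i : Int) (j : Int) (x : Int) (out : Int) : Prop := ¬ D_count i j x → out = count_alt i j x
instance (i : Int) (j : Int) (x : Int) (out : Int) : Decidable (Spec_count i j x out) := by unfold Spec_count; infer_instance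

def pvDiffWitness_count : Int × Int × Int := (0, -1, 0)
def pvDiffWitnessOut_count : Int × Int := (1, 0)

-- ===== CLAIM (what is proved, stated in full; the proofs are below) =====
def Claim_unchanged_count : Prop := ∀ (i : Int) (j : Int) (x : Int), Dom_count i j x → Pre_count i j x → Spec_count i j x (count i j x)
def Claim_changed_count : Prop := Dom_count (pvDiffWitness_count.1) (pvDiffWitness_count.2.1) (pvDiffWitness_count.2.2) ∧ Pre_count (pvDiffWitness_count.1) (pvDiffWitness_count.2.1) (pvDiffWitness_count.2.2) ∧ D_count (pvDiffWitness_count.1) (pvDiffWitness_count.2.1) (pvDiffWitness_count.2.2) ∧ count (pvDiffWitness_count.1) (pvDiffWitness_count.2.1) (pvDiffWitness_count.2.2) = pvDiffWitnessOut_count.1 ∧ count_alt (pvDiffWitness_count.1) (pvDiffWitness_count.2.1) (pvDiffWitness_count.2.2) = pvDiffWitnessOut_count.2 ∧ pvDiffWitnessOut_count.1 ≠ pvDiffWitnessOut_count.2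
def Claim_exact_count : Prop := ∀ (i : Int) (j : Int) (x : Int), Dom_count i j x → Pre_count i j x → D_count i j x → count i j x ≠ count_alt i j x

-- ===== LEMMAS AND PROOFS =====

-- mathematical binomial coefficient over Int, 0 outside 0 ≤ m ≤ n
def B2 (n m : Int) : Int := if 0 ≤ m ∧ m ≤ n then (n.toNat.choose m.toNat : Int) else 0

def cnt1 (t : List Char) : Int := (t.count '1' : Int)

-- A's digit loop, structurally over the suffix (same breaking behaviour), with B2 for C
def AF : List Char → Int → Int × Int
  | [], rm => (0, rm)
  | c :: t, rm =>
    if rm < 0 then (0, rm)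
    else if c = '1' then (B2 t.length rm + (AF t (rm - 1)).1, (AF t (rm - 1)).2)
    else AF t rm

-- B's over-count, structurally over the suffix, with m = j - ones
def BGm : List Char → Int → Int
  | [], _ => 0
  | c :: t, m => if c = '0' then B2 t.length m + BGm t m else BGm t (m - 1)

def eq1 (t : List Char) (m : Int) : Int := if cnt1 t = m then 1 else 0

-- binary digit string of a natural number, msb first
def bins (n : Nat) : List Char :=
  if h : n < 2 then [Nat.digitChar n]
  else bins (n / 2) ++ [Nat.digitChar (n % 2)]
termination_by n
decreasing_by exact Nat.div_lt_self (by omega) (by omega)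

theorem pyRange_nil {a b : Int} (h : b ≤ a) : PySem.List.pyRange a b = [] := by
  simp [PySem.List.pyRange, not_lt.mpr h]

theorem gcdA_eq : ∀ (n : Nat) (a b : Int), b.natAbs = n → 0 ≤ a → 0 ≤ b → gcdA a b = (Int.gcd a b : Int) := by
  intro n
  induction n using Nat.strong_induction_on with
  | _ n ih =>
    intro a b hn ha hb
    rw [gcdA]
    split_ifs with h0
    · subst h0; simp [Int.gcd, Int.natAbs_of_nonneg ha]
    · have hbpos : 0 < b := by omega
      have hmod : PySem.Int.mod a b = a % b := by
        simp only [PySem.Int.mod, Int.fmod_eq_emod]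
        split_ifs with hd
        · ring
        · exact absurd (Or.inl (le_of_lt hbpos)) hd
      rw [hmod]
      have hlt : (a % b).natAbs < n := by
        rw [← hn]
        have := Int.emod_nonneg a h0
        have := Int.emod_lt_of_pos a hbpos
        omega
      rw [ih _ hlt b (a % b) rfl hb (Int.emod_nonneg a h0)]
      rw [Int.gcd_comm, Int.gcd_emod]

-- ∏_{m=1..t} (n - k + m)
def Pp (n k : Int) : Nat → Int
  | 0 => 1
  | t + 1 => Pp n k t * (n - k + (t + 1))

theorem Pp_factorial (n k : Int) (h0 : 0 ≤ k) (hk : k ≤ n) :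
    ∀ t : Nat, (t : Int) ≤ k →
      Pp n k t * ((n.toNat - k.toNat).factorial : Int) = (((n.toNat - k.toNat) + t).factorial : Int) := by
  intro t
  induction t with
  | zero => simp [Pp]
  | succ t ih =>
    intro ht
    have ht' : (t : Int) ≤ k := by push_cast at ht ⊢; omega
    have harg : n - k + ((t : Int) + 1) = (((n.toNat - k.toNat) + t + 1 : Nat) : Int) := by
      push_cast; omega
    calc Pp n k (t + 1) * ((n.toNat - k.toNat).factorial : Int)
        = (Pp n k t * ((n.toNat - k.toNat).factorial : Int)) * (n - k + ((t : Int) + 1)) := by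
          simp [Pp]; push_cast; ring
      _ = (((n.toNat - k.toNat) + t).factorial : Int) * (((n.toNat - k.toNat) + t + 1 : Nat) : Int) := by
          rw [ih ht', harg]
      _ = (((n.toNat - k.toNat) + (t + 1)).factorial : Int) := by
          rw [show (n.toNat - k.toNat) + (t + 1) = ((n.toNat - k.toNat) + t) + 1 by omega,
            Nat.factorial_succ]
          push_cast; ring

theorem foldC_inv (n k : Int) (h0 : 0 ≤ k) (hk : k ≤ n) :
    ∀ t : Nat, (t : Int) ≤ k →
      ∃ tu mau : Int, (PySem.List.pyRange 1 ((t : Int) + 1)).foldl (stepC n k) (1, 1) = (tu, mau) ∧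
        0 < tu ∧ 0 < mau ∧ Int.gcd tu mau = 1 ∧
        tu * (Nat.factorial t : Int) = mau * Pp n k t := by
  intro t
  induction t with
  | zero =>
    intro _
    refine ⟨1, 1, ?_, by norm_num, by norm_num, by norm_num [Int.gcd], by simp [Pp]⟩
    norm_num [pyRange_nil (by norm_num : (1:Int) ≤ 1)]
  | succ t ih =>
    intro ht
    have ht' : (t : Int) ≤ k := by push_cast at ht ⊢; omega
    obtain ⟨tu, mau, hfold, htu, hmau, hgcd, hprod⟩ := ih ht'
    have hrange : PySem.List.pyRange 1 (((t : Nat) + 1 : Int) + 1)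
        = PySem.List.pyRange 1 ((t : Int) + 1) ++ [(t : Int) + 1] := by
      exact PySem.List.pyRange_one_succ_right (by omega)
    have hstep : (PySem.List.pyRange 1 (((t : Nat) + 1 : Int) + 1)).foldl (stepC n k) (1, 1)
        = stepC n k (tu, mau) ((t : Int) + 1) := by
      push_cast at hrange ⊢
      rw [hrange, List.foldl_append, hfold]; rfl
    -- the new unreduced pair
    set a : Int := n - k + ((t : Int) + 1) with ha
    have hapos : 0 < a := by omega
    set tu1 : Int := tu * a with htu1
    set mau1 : Int := mau * ((t : Int) + 1) with hmau1
    have htu1pos : 0 < tu1 := mul_pos htu hapos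
    have hmau1pos : 0 < mau1 := mul_pos hmau (by positivity)
    set g : Int := (Int.gcd tu1 mau1 : Int) with hg
    have hgpos : 0 < g := by
      have : Int.gcd tu1 mau1 ≠ 0 := by
        simp [Int.gcd_eq_zero_iff]; omega
      omega
    have hdt : g ∣ tu1 := Int.gcd_dvd_left tu1 mau1
    have hdm : g ∣ mau1 := Int.gcd_dvd_right tu1 mau1
    have hgA : gcdA tu1 mau1 = g := gcdA_eq _ tu1 mau1 rfl (le_of_lt htu1pos) (le_of_lt hmau1pos)
    have hfd1 : PySem.Int.floordiv tu1 g = tu1 / g := Int.fdiv_eq_ediv_of_dvd hdt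
    have hfd2 : PySem.Int.floordiv mau1 g = mau1 / g := Int.fdiv_eq_ediv_of_dvd hdm
    refine ⟨tu1 / g, mau1 / g, ?_, ?_, ?_, ?_, ?_⟩
    · push_cast
      rw [hstep]
      simp only [stepC]
      rw [← ha, ← htu1, hgA, hfd1, hfd2]
    · exact Int.ediv_pos_of_pos_of_dvd htu1pos (le_of_lt hgpos) hdt
    · exact Int.ediv_pos_of_pos_of_dvd hmau1pos (le_of_lt hgpos) hdm
    · exact Int.gcd_div_gcd_div_gcd (by omega)
    · have hkey : tu1 * (Nat.factorial (t + 1) : Int) = mau1 * Pp n k (t + 1) := by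
        simp only [htu1, hmau1, Pp, Nat.factorial_succ, ← ha]
        push_cast
        calc tu * a * ((((t : Int)) + 1) * (t.factorial : Int))
            = (tu * (t.factorial : Int)) * (a * ((t : Int) + 1)) := by ring
          _ = (mau * Pp n k t) * (a * ((t : Int) + 1)) := by rw [hprod]
          _ = mau * ((t : Int) + 1) * (Pp n k t * a) := by ring
      obtain ⟨tu2, htu2⟩ := hdt
      obtain ⟨mau2, hmau2⟩ := hdm
      rw [htu2, hmau2, Int.mul_ediv_cancel_left _ (by omega), Int.mul_ediv_cancel_left _ (by omega)]
      rw [htu2, hmau2] at hkey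
      have := mul_left_cancel₀ (a := g) (by omega)
        (by linarith [hkey] : g * (tu2 * (Nat.factorial (t + 1) : Int)) = g * (mau2 * Pp n k (t + 1)))
      exact this

theorem foldC_choose (n k : Int) (h0 : 0 ≤ k) (hk : k ≤ n) :
    PySem.Int.floordiv ((PySem.List.pyRange 1 (k + 1)).foldl (stepC n k) (1, 1)).1
      ((PySem.List.pyRange 1 (k + 1)).foldl (stepC n k) (1, 1)).2
      = (n.toNat.choose k.toNat : Int) := by
  have hkt : ((k.toNat : Nat) : Int) = k := Int.toNat_of_nonneg h0
  obtain ⟨tu, mau, hfold, htu, hmau, hgcd, hprod⟩ := foldC_inv n k h0 hk k.toNat (by omega)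
  rw [hkt] at hfold
  rw [hfold]
  have hk0a : k.toNat ≤ n.toNat := by omega
  have hPf := Pp_factorial n k h0 hk k.toNat (by omega)
  have hch := Nat.choose_mul_factorial_mul_factorial hk0a
  have hA : (n.toNat - k.toNat) + k.toNat = n.toNat := by omega
  have hfacpos : (0:Int) < (Nat.factorial k.toNat : Int) * ((n.toNat - k.toNat).factorial : Int) := by
    have := Nat.factorial_pos k.toNat
    have := Nat.factorial_pos (n.toNat - k.toNat)
    positivity
  have htu_eq : tu = mau * (n.toNat.choose k.toNat : Int) := by
    apply mul_right_cancel₀ (ne_of_gt hfacpos)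
    calc tu * ((Nat.factorial k.toNat : Int) * ((n.toNat - k.toNat).factorial : Int))
        = (tu * (Nat.factorial k.toNat : Int)) * ((n.toNat - k.toNat).factorial : Int) := by ring
      _ = mau * (Pp n k k.toNat * ((n.toNat - k.toNat).factorial : Int)) := by rw [hprod]; ring
      _ = mau * (((n.toNat - k.toNat) + k.toNat).factorial : Int) := by rw [hPf]
      _ = mau * ((n.toNat.choose k.toNat : Int) * (Nat.factorial k.toNat : Int) * ((n.toNat - k.toNat).factorial : Int)) := by
          rw [hA, ← hch]; push_cast; ring
      _ = mau * (n.toNat.choose k.toNat : Int) * ((Nat.factorial k.toNat : Int) * ((n.toNat - k.toNat).factorial : Int)) := by ring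
  have hdvd : mau ∣ tu := ⟨(n.toNat.choose k.toNat : Int), htu_eq⟩
  have hone : mau.natAbs ∣ 1 := by
    rw [← hgcd, Int.gcd]
    exact Nat.dvd_gcd (Int.natAbs_dvd_natAbs.mpr hdvd) dvd_rfl
  have hmau1 : mau = 1 := by
    have := Nat.le_of_dvd (by norm_num) hone
    omega
  rw [hmau1, one_mul] at htu_eq
  simp only [PySem.Int.floordiv, hmau1, Int.fdiv_one, htu_eq]

theorem CA_eq_B2 (n k : Int) (hk : 0 ≤ k) : CA n k = B2 n k := by
  unfold CA B2
  split_ifs with h1 h2 h3 h4 h5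
  all_goals try omega
  · -- k ≤ n, swap branch: k' = n - k
    have h0' : (0:Int) ≤ n - k := by omega
    have hkn' : n - k ≤ n := by omega
    rw [foldC_choose n (n - k) h0' hkn']
    have : (n - k).toNat = n.toNat - k.toNat := by omega
    rw [this, Nat.choose_symm (by omega)]
  · -- k ≤ n, no swap: k' = k
    exact foldC_choose n k hk (by omega)

theorem CA_neg_one (n k : Int) (hneg : k < 0) (hle : k ≤ n) : CA n k = 1 := by
  unfold CA
  split_ifs with h1 h2
  · omega
  · omega
  · show PySem.Int.floordiv ((PySem.List.pyRange 1 (k + 1)).foldl (stepC n k) (1, 1)).1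
        ((PySem.List.pyRange 1 (k + 1)).foldl (stepC n k) (1, 1)).2 = 1
    rw [pyRange_nil (by omega)]
    norm_num [PySem.Int.floordiv, Int.fdiv]

theorem foldB_choose (n k : Int) (h0 : 0 ≤ k) (hk : k ≤ n) :
    ∀ t : Nat, (t : Int) ≤ k →
      (PySem.List.pyRange 0 (t : Int)).foldl (stepB n) 1 = (n.toNat.choose t : Int) := by
  intro t
  induction t with
  | zero => simp [pyRange_nil (by norm_num : (0:Int) ≤ 0)]
  | succ t ih =>
    intro ht
    have ht' : (t : Int) ≤ k := by push_cast at ht ⊢; omega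
    have hta : t < n.toNat := by omega
    have hrange : PySem.List.pyRange 0 (((t + 1 : Nat)) : Int)
        = PySem.List.pyRange 0 ((t : Int)) ++ [(t : Int)] := by
      push_cast
      exact PySem.List.pyRange_one_succ_right (by positivity)
    rw [hrange, List.foldl_append, ih ht']
    simp only [List.foldl, stepB]
    have hnt : n - (t : Int) = ((n.toNat - t : Nat) : Int) := by push_cast; omega
    have hmulN : n.toNat.choose t * (n.toNat - t) = n.toNat.choose (t + 1) * (t + 1) :=
      (Nat.choose_succ_right_eq _ _).symm
    have hmul : (n.toNat.choose t : Int) * (n - (t : Int))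
        = (n.toNat.choose (t + 1) : Int) * ((t : Int) + 1) := by
      rw [hnt]; exact_mod_cast hmulN
    rw [hmul]
    rw [show ((t:Int) + 1) = (((t + 1 : Nat)) : Int) by push_cast; ring] at *
    rw [PySem.Int.floordiv, Int.fdiv_eq_ediv_of_dvd ⟨_, mul_comm _ _⟩,
      Int.mul_ediv_cancel _ (by positivity)]

theorem binomB_eq_B2 (n k : Int) : binomB n k = B2 n k := by
  unfold binomB B2
  split_ifs with h1 h2
  · omega
  · rfl
  · -- 0 ≤ k ≤ n
    rcases le_total k (n - k) with hm | hm
    · rw [min_eq_left hm]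
      have := foldB_choose n k (by omega) (by omega) k.toNat (by omega)
      rw [Int.toNat_of_nonneg (by omega)] at this
      exact this
    · rw [min_eq_right hm]
      have := foldB_choose n (n - k) (by omega) (by omega) (n - k).toNat (by omega)
      rw [Int.toNat_of_nonneg (by omega)] at this
      rw [this, show (n - k).toNat = n.toNat - k.toNat by omega, Nat.choose_symm (by omega)]
  · omega

-- bins facts
theorem toDigitsCore_eq_bins : ∀ (f n : Nat) (acc : List Char), n < f →
    Nat.toDigitsCore 2 f n acc = bins n ++ acc := by
  intro f
  induction f with
  | zero => intro n acc h; omega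
  | succ f ih =>
    intro n acc h
    rw [Nat.toDigitsCore]
    by_cases h2 : n / 2 = 0
    · have hn2 : n < 2 := by omega
      simp only [h2, if_true]
      rw [Nat.mod_eq_of_lt hn2]
      conv_rhs => rw [bins, dif_pos hn2]
      rfl
    · have hn2 : ¬ n < 2 := by omega
      simp only [h2, if_false]
      rw [ih (n / 2) _ (by omega)]
      conv_rhs => rw [bins, dif_neg hn2]
      rw [List.append_assoc]
      rfl

theorem slice_bin (x : Int) (hx : 0 ≤ x) :
    PySem.List.slice (PySem.Int.toBinChars0b x) (some 2) none = bins x.toNat := by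
  have hs := PySem.List.slice_from (PySem.Int.toBinChars0b x) (a := 2) (by norm_num)
  rw [hs]
  simp only [PySem.Int.toBinChars0b, if_neg (by omega : ¬ x < 0)]
  show Nat.toDigits 2 x.toNat = bins x.toNat
  rw [Nat.toDigits, toDigitsCore_eq_bins _ _ _ (by omega), List.append_nil]

theorem bins_length_pos (n : Nat) : 0 < (bins n).length := by
  rw [bins]
  split_ifs <;> simp

theorem bins_chars (n : Nat) : ∀ c ∈ bins n, c = '0' ∨ c = '1' := by
  induction n using Nat.strong_induction_on with
  | _ n ih =>
    rw [bins]
    split_ifs with h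
    · interval_cases n
      · intro c hc; simp at hc; subst hc; left; rfl
      · intro c hc; simp at hc; subst hc; right; rfl
    · intro c hc
      rcases List.mem_append.mp hc with h1 | h2
      · exact ih (n / 2) (Nat.div_lt_self (by omega) (by omega)) c h1
      · simp at h2; subst h2
        have : n % 2 = 0 ∨ n % 2 = 1 := by omega
        rcases this with h3 | h3 <;> rw [h3]
        · left; rfl
        · right; rfl

theorem bins_head (n : Nat) (h : 1 ≤ n) : ∃ t, bins n = '1' :: t := by
  induction n using Nat.strong_induction_on with
  | _ n ih =>
    rw [bins]
    split_ifs with h2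
    · interval_cases n
      exact ⟨[], rfl⟩
    · obtain ⟨t, ht⟩ := ih (n / 2) (Nat.div_lt_self (by omega) (by omega)) (by omega)
      exact ⟨t ++ [Nat.digitChar (n % 2)], by rw [ht]; rfl⟩

theorem bins_lt (n : Nat) : n < 2 ^ (bins n).length := by
  induction n using Nat.strong_induction_on with
  | _ n ih =>
    rw [bins]
    split_ifs with h
    · simpa using h
    · have hd := ih (n / 2) (Nat.div_lt_self (by omega) (by omega))
      rw [List.length_append, List.length_singleton, pow_succ]
      omega

theorem bins_ge (n : Nat) (h : 1 ≤ n) : 2 ^ ((bins n).length - 1) ≤ n := by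
  induction n using Nat.strong_induction_on with
  | _ n ih =>
    rw [bins]
    split_ifs with h2
    · simpa using h
    · have hd := ih (n / 2) (Nat.div_lt_self (by omega) (by omega)) (by omega)
      have hl := bins_length_pos (n / 2)
      rw [List.length_append, List.length_singleton]
      have : (bins (n / 2)).length + 1 - 1 = ((bins (n / 2)).length - 1) + 1 := by omega
      rw [this, pow_succ]
      omega

-- i < len(bin(x)[2:]) in closed form, for 0 ≤ x
theorem lt_len_iff (i x : Int) (hx : 0 ≤ x) :
    i < ((bins x.toNat).length : Int) ↔ (i ≤ 0 ∨ 2 ^ i.toNat ≤ x) := by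
  constructor
  · intro hlt
    by_cases hi : i ≤ 0
    · exact Or.inl hi
    · right
      have hx1 : 1 ≤ x := by
        by_contra h0
        have hx0 : x.toNat = 0 := by omega
        rw [hx0] at hlt
        have : (bins 0).length = 1 := by rw [bins]; simp
        omega
      have hge := bins_ge x.toNat (by omega)
      have hpow : (2:Nat) ^ i.toNat ≤ 2 ^ ((bins x.toNat).length - 1) :=
        Nat.pow_le_pow_right (by norm_num) (by omega)
      have : (2:Nat) ^ i.toNat ≤ x.toNat := le_trans hpow hge
      have h2 : ((2:Nat) ^ i.toNat : Int) = (2:Int) ^ i.toNat := by push_cast; rfl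
      omega
  · intro hcase
    rcases hcase with hi | hle
    · have := bins_length_pos x.toNat; omega
    · have hx1 : (1:Int) ≤ x := le_trans (one_le_pow₀ (by norm_num)) hle
      have hlt2 := bins_lt x.toNat
      have hle' : (2:Nat) ^ i.toNat ≤ x.toNat := by
        have h2 : ((2:Nat) ^ i.toNat : Int) = (2:Int) ^ i.toNat := by push_cast; rfl
        omega
      have hexp : i.toNat < (bins x.toNat).length :=
        (Nat.pow_lt_pow_iff_right (by norm_num)).mp (lt_of_le_of_lt hle' hlt2)
      omega

-- B2 facts
theorem B2_neg (n m : Int) (h : m < 0) : B2 n m = 0 := by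
  simp [B2]; omega

theorem cnt1_nonneg (t : List Char) : 0 ≤ cnt1 t := Int.natCast_nonneg _

theorem cnt1_cons_one (t : List Char) : cnt1 ('1' :: t) = cnt1 t + 1 := by
  simp [cnt1, List.count_cons]

theorem cnt1_cons_ne (c : Char) (t : List Char) (h : ¬ c = '1') : cnt1 (c :: t) = cnt1 t := by
  simp [cnt1, List.count_cons, h]

theorem pascal (n : Nat) (m : Int) : B2 ((n : Int) + 1) m = B2 (n : Int) m + B2 (n : Int) (m - 1) := by
  unfold B2
  have hn : ((n : Int) + 1).toNat = n + 1 := by omega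
  have hnn : ((n : Int)).toNat = n := by omega
  split_ifs with h1 h2 h3 h4 h5 h6 <;> try (exfalso; omega)
  · -- all true: 1 ≤ m ≤ n
    rw [hn, hnn, show m.toNat = (m - 1).toNat + 1 by omega, Nat.choose_succ_succ]
    push_cast; ring
  · -- m = 0 case
    have hm0 : m = 0 := by omega
    subst hm0
    simp
  · -- m = n + 1
    rw [hn, hnn, show m.toNat = n + 1 by omega, show (m - 1).toNat = n by omega]
    simp [Nat.choose_self, Nat.choose_succ_self]
  · -- outside everywhere
    ring

theorem BGm_neg : ∀ (t : List Char) (m : Int), m < 0 → BGm t m = 0 := by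
  intro t
  induction t with
  | nil => intro m _; rfl
  | cons c t ih =>
    intro m h
    simp only [BGm]
    split_ifs
    · rw [B2_neg _ _ h, ih m h]; ring
    · exact ih (m - 1) (by omega)

theorem AF_neg (t : List Char) (rm : Int) (h : rm < 0) : AF t rm = (0, rm) := by
  cases t <;> simp [AF, h]

theorem AF_cons_one (t : List Char) (rm : Int) (hr : ¬ rm < 0) :
    AF ('1' :: t) rm = (B2 (t.length : Int) rm + (AF t (rm - 1)).1, (AF t (rm - 1)).2) := by
  simp [AF, hr]

theorem AF_cons_ne (c : Char) (t : List Char) (rm : Int) (hr : ¬ rm < 0) (hc : ¬ c = '1') :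
    AF (c :: t) rm = AF t rm := by
  simp [AF, hr, hc]

theorem BGm_cons_zero (t : List Char) (m : Int) : BGm ('0' :: t) m = B2 (t.length : Int) m + BGm t m := by
  simp [BGm]

theorem BGm_cons_ne (c : Char) (t : List Char) (m : Int) (hc : ¬ c = '0') :
    BGm (c :: t) m = BGm t (m - 1) := by
  simp [BGm, hc]

theorem AF_rm_eq : ∀ (t : List Char) (rm : Int), cnt1 t ≤ rm → (AF t rm).2 = rm - cnt1 t := by
  intro t
  induction t with
  | nil => intro rm _; simp [AF, cnt1]
  | cons c t ih =>
    intro rm h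
    have h0 := cnt1_nonneg t
    by_cases hc : c = '1'
    · subst hc
      rw [cnt1_cons_one] at h ⊢
      have hr : ¬ rm < 0 := by omega
      rw [AF_cons_one t rm hr]
      simp only []
      rw [ih (rm - 1) (by omega)]
      ring
    · rw [cnt1_cons_ne c t hc] at h ⊢
      have hr : ¬ rm < 0 := by omega
      rw [AF_cons_ne c t rm hr hc]
      exact ih rm h

theorem core_identity : ∀ (t : List Char), (∀ c ∈ t, c = '0' ∨ c = '1') → ∀ m : Int,
    (AF t m).1 + eq1 t m + BGm t (m - 1) = B2 (t.length : Int) m := by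
  intro t
  induction t with
  | nil =>
    intro _ m
    simp only [AF, BGm, eq1, cnt1, List.count_nil, Nat.cast_zero, List.length_nil, B2]
    by_cases hm : m = 0
    · subst hm; norm_num
    · rw [if_neg (Ne.symm hm), if_neg (by omega)]; ring
  | cons c t ih =>
    intro hb m
    have ihb : ∀ c' ∈ t, c' = '0' ∨ c' = '1' := fun c' hc' => hb c' (List.mem_cons_of_mem c hc')
    have hlen : ((c :: t).length : Int) = (t.length : Int) + 1 := by push_cast [List.length_cons]; ring
    rw [hlen, pascal t.length m]
    by_cases hm : m < 0
    · rw [AF_neg _ _ hm]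
      have he : eq1 (c :: t) m = 0 := by
        have := cnt1_nonneg (c :: t)
        simp only [eq1]; rw [if_neg (by omega)]
      rw [he, BGm_neg _ _ (by omega), B2_neg _ _ hm, B2_neg _ _ (by omega)]
      ring
    · rcases hb c List.mem_cons_self with hc | hc
      · -- c = '0'
        subst hc
        have hne : ¬ ('0' : Char) = '1' := by decide
        rw [AF_cons_ne '0' t m hm hne, BGm_cons_zero]
        have he : eq1 ('0' :: t) m = eq1 t m := by
          simp only [eq1, cnt1_cons_ne '0' t hne]
        rw [he]
        have := ih ihb m
        linarith [this]
      · -- c = '1'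
        subst hc
        rw [AF_cons_one t m hm, BGm_cons_ne '1' t (m - 1) (by decide)]
        simp only []
        have he : eq1 ('1' :: t) m = eq1 t (m - 1) := by
          simp only [eq1, cnt1_cons_one]
          have hiff : (cnt1 t + 1 = m) ↔ (cnt1 t = m - 1) := by omega
          rw [if_congr hiff rfl rfl]
        rw [he]
        have := ih ihb (m - 1)
        rw [show m - 1 - 1 = m - 2 by ring] at this
        rw [show m - 1 - 1 = m - 2 by ring]
        linarith [this]

-- bridge: A's port loop equals AF on the dropped suffix
theorem loop_bridge (s : List Char) : ∀ (d k : Nat) (ans rm : Int), s.length - k = d → k ≤ s.length →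
    loopA (s.length : Int) s (PySem.List.pyRange (k : Int) (s.length : Int)) ans rm
      = (ans + (AF (s.drop k) rm).1, (AF (s.drop k) rm).2) := by
  intro d
  induction d with
  | zero =>
    intro k ans rm hd hk
    have hk' : k = s.length := by omega
    subst hk'
    rw [pyRange_nil (by omega), List.drop_length]
    simp [loopA, AF]
  | succ d ihd =>
    intro k ans rm hd hk
    have hklt : k < s.length := by omega
    have hcons : PySem.List.pyRange (k : Int) (s.length : Int)
        = (k : Int) :: PySem.List.pyRange ((k : Int) + 1) (s.length : Int) :=
      PySem.List.pyRange_one_cons (by exact_mod_cast hklt)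
    have hdrop : s.drop k = s[k] :: s.drop (k + 1) := List.drop_eq_getElem_cons hklt
    have hget : PySem.List.pyGetD s (k : Int) ' ' = s[k] := by
      rw [PySem.List.pyGetD_natCast]
      exact List.getD_eq_getElem s ' ' hklt
    have harith : ((k : Int) + 1) = ((k + 1 : Nat) : Int) := by push_cast; ring
    have hlend : ((s.drop (k + 1)).length : Int) = (s.length : Int) - (k : Int) - 1 := by
      rw [List.length_drop]; push_cast; omega
    rw [hcons]
    simp only [loopA]
    by_cases hr : rm < 0
    · rw [if_pos hr, hdrop, AF_neg _ _ hr]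
      norm_num
    · rw [if_neg hr, hget]
      by_cases h1 : s[k] = '1'
      · rw [if_pos h1, harith, ihd (k + 1) _ _ (by omega) (by omega)]
        rw [hdrop, h1, AF_cons_one _ _ hr]
        rw [CA_eq_B2 _ rm (by omega), hlend]
        rw [add_assoc]
      · rw [if_neg h1, harith, ihd (k + 1) _ _ (by omega) (by omega)]
        rw [hdrop, AF_cons_ne _ _ _ hr h1]

-- bridge: B's port fold equals BGm
theorem fold_bridge (i j : Int) : ∀ (t : List Char) (ovr ones k : Int), k + (t.length : Int) = i →
    (t.foldl (stepO i j) (ovr, ones, k)).1 = ovr + BGm t (j - ones) := by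
  intro t
  induction t with
  | nil => intro ovr ones k _; simp [BGm]
  | cons c t ih =>
    intro ovr ones k hk
    have hlen : i - 1 - k = (t.length : Int) := by push_cast [List.length_cons] at hk ⊢; omega
    simp only [List.foldl_cons]
    by_cases hc : c = '0'
    · subst hc
      rw [show stepO i j (ovr, ones, k) '0' = (ovr + binomB (i - 1 - k) (j - ones), ones, k + 1) from by
        simp [stepO]]
      rw [ih _ _ _ (by push_cast at hk ⊢; omega)]
      rw [BGm_cons_zero, hlen, binomB_eq_B2]
      ring
    · rw [show stepO i j (ovr, ones, k) c = (ovr, ones + 1, k + 1) from by simp [stepO, hc]]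
      rw [ih _ _ _ (by push_cast at hk ⊢; omega)]
      rw [BGm_cons_ne c t _ hc, show j - (ones + 1) = j - ones - 1 by ring]

theorem count_eq (i j x : Int) (hx : 0 ≤ x) :
    count i j x = (if ((bins x.toNat).length : Int) < i then 0
      else if i < ((bins x.toNat).length : Int) then CA (i - 1) j
      else if 0 ≤ (loopA i (bins x.toNat) (PySem.List.pyRange 1 i) 0 j).2 ∧
              (((bins x.toNat).count '1' : Int) = j + 1)
           then (loopA i (bins x.toNat) (PySem.List.pyRange 1 i) 0 j).1 + 1
           else (loopA i (bins x.toNat) (PySem.List.pyRange 1 i) 0 j).1) := by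
  unfold count
  rw [slice_bin x hx]
  simp only [PySem.List.len_eq, gt_iff_lt]

theorem count_alt_eq (i j x : Int) (hx : 0 ≤ x) :
    count_alt i j x = (if ((bins x.toNat).length : Int) < i then 0
      else if i < ((bins x.toNat).length : Int) then binomB (i - 1) j
      else binomB (i - 1) j - ((bins x.toNat).foldl (stepO i j) (0, 0, 0)).1) := by
  unfold count_alt
  rw [slice_bin x hx]
  simp only [PySem.List.len_eq, gt_iff_lt]

-- ===== VERDICT =====
theorem count_spec : Claim_unchanged_count := by
  unfold Claim_unchanged_count
  intro i j x _ hPre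
  intro hnD
  have hx : 0 ≤ x := hPre
  rw [count_eq i j x hx, count_alt_eq i j x hx]
  by_cases hgt : ((bins x.toNat).length : Int) < i
  · rw [if_pos hgt, if_pos hgt]
  · rw [if_neg hgt, if_neg hgt]
    by_cases hlt : i < ((bins x.toNat).length : Int)
    · -- i below the bit length
      rw [if_pos hlt, if_pos hlt]
      have hD3 : i ≤ 0 ∨ 2 ^ i.toNat ≤ x := (lt_len_iff i x hx).mp hlt
      have hnot : ¬ (j < 0 ∧ j ≤ i - 1) := fun hcon => hnD ⟨hcon.1, hcon.2, hD3⟩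
      rcases lt_or_ge j 0 with hj | hj
      · have hji : i ≤ j := by omega
        unfold CA binomB
        rw [if_pos (by omega : j > i - 1), if_pos (Or.inl hj)]
      · rw [CA_eq_B2 _ _ hj, binomB_eq_B2]
    · -- tight: i equals the bit length
      rw [if_neg hlt, if_neg hlt]
      have hieq : i = ((bins x.toNat).length : Int) := by omega
      by_cases hx0 : x = 0
      · subst hx0
        have hb0 : bins (0 : Int).toNat = ['0'] := by rw [bins]; rfl
        rw [hb0] at hieq ⊢
        simp only [List.length_cons, List.length_nil] at hieq
        rw [hieq]
        rw [pyRange_nil (by norm_num)]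
        simp only [loopA]
        rw [if_neg (by
          intro hcon
          obtain ⟨hc1, hc2⟩ := hcon
          have h1 : (['0'].count '1') = 0 := rfl
          rw [h1] at hc2
          push_cast at hc2
          omega)]
        simp [stepO, binomB]
      · have hx1 : 1 ≤ x.toNat := by omega
        obtain ⟨t, ht⟩ := bins_head x.toNat hx1
        have hlen1 : 1 ≤ (bins x.toNat).length := bins_length_pos x.toNat
        have hloop := loop_bridge (bins x.toNat) ((bins x.toNat).length - 1) 1 0 j rfl (by omega)
        have hdrop1 : (bins x.toNat).drop 1 = t := by rw [ht]; rfl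
        rw [hdrop1] at hloop
        have hrange1 : PySem.List.pyRange ((1 : Nat) : Int) ((bins x.toNat).length : Int)
            = PySem.List.pyRange 1 ((bins x.toNat).length : Int) := by norm_num
        rw [hrange1] at hloop
        rw [← hieq] at hloop
        rw [hloop]
        have hfold := fold_bridge i j (bins x.toNat) 0 0 0 (by omega)
        have hcnt : ((bins x.toNat).count '1' : Int) = cnt1 t + 1 := by
          rw [ht, ← cnt1_cons_one t]; rfl
        have hcore := core_identity (bins x.toNat) (bins_chars x.toNat) (j + 1)
        rw [show j + 1 - 1 = j by ring] at hcore
        have hBG : ((bins x.toNat).foldl (stepO i j) (0, 0, 0)).1 = BGm (bins x.toNat) j := by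
          rw [hfold, show j - 0 = j by ring, zero_add]
        rw [hBG, binomB_eq_B2]
        have hlt1 : i - 1 = (t.length : Int) := by
          rw [hieq, ht]; push_cast [List.length_cons]; ring
        rw [hlt1]
        -- express the +1 term as eq1 t j
        have hifeq : (if 0 ≤ (0 + (AF t j).1, (AF t j).2).2 ∧ ((bins x.toNat).count '1' : Int) = j + 1
              then (0 + (AF t j).1, (AF t j).2).1 + 1
              else (0 + (AF t j).1, (AF t j).2).1) = (AF t j).1 + eq1 t j := by
          simp only [hcnt]
          by_cases hcj : cnt1 t = j
          · rw [if_pos ⟨by rw [AF_rm_eq t j (le_of_eq hcj)]; omega, by omega⟩]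
            rw [eq1, if_pos hcj]; ring
          · rw [if_neg (by intro hcon; exact hcj (by omega)), eq1, if_neg hcj]; ring
        rw [hifeq]
        rcases lt_or_ge j 0 with hj | hj
        · have h1 : (AF t j).1 = 0 := by rw [AF_neg t j hj]
          have h2 : eq1 t j = 0 := by
            rw [eq1, if_neg (by have := cnt1_nonneg t; omega)]
          rw [h1, h2, B2_neg _ _ hj, BGm_neg _ _ hj]
          ring
        · have hAFs : (AF (bins x.toNat) (j + 1)).1 = B2 (t.length : Int) (j + 1) + (AF t j).1 := by
            rw [ht, AF_cons_one t (j + 1) (by omega)]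
            simp only []
            rw [show j + 1 - 1 = j by ring]
          have heqs : eq1 (bins x.toNat) (j + 1) = eq1 t j := by
            rw [ht]
            simp only [eq1, cnt1_cons_one]
            exact if_congr (by omega) rfl rfl
          rw [hAFs, heqs] at hcore
          have hlens : ((bins x.toNat).length : Int) = (t.length : Int) + 1 := by
            rw [ht]; push_cast [List.length_cons]; ring
          rw [hlens] at hcore
          have hpas := pascal t.length (j + 1)
          rw [show j + 1 - 1 = j by ring] at hpas
          linarith

theorem count_changed : Claim_changed_count := by
  unfold Claim_changed_count; decide

theorem count_tight : Claim_exact_count := by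
  unfold Claim_exact_count
  intro i j x _ hPre hD
  obtain ⟨hj, hji, h3⟩ := hD
  have hx : 0 ≤ x := hPre
  have hlt : i < ((bins x.toNat).length : Int) := (lt_len_iff i x hx).mpr h3
  rw [count_eq i j x hx, count_alt_eq i j x hx, if_neg (by omega : ¬ ((bins x.toNat).length : Int) < i),
    if_pos hlt, if_neg (by omega : ¬ ((bins x.toNat).length : Int) < i), if_pos hlt]
  rw [CA_neg_one (i - 1) j hj (by omega)]
  unfold binomB
  rw [if_pos (Or.inl hj)]
  norm_num
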